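-- pv_equiv track=rewrite | github.com/Adityaking110/assignment8_tds | abc.py | valid_expression
-- ===== SOURCE A (Python) =====
-- def valid_expression(strex):
--     """
--     Evaluate if strex is a valid mathematical expression.
--     """
--     for i in range(len(strex)):
--         # If the first char is invalid.
--         if i==0:
--             if strex[i] in ['+', '-', '*', '/', '%', ')']:
--                 return False
--
--         # If the last char is also invalid.
--         if i == len(strex) - 1:
--             if strex[i] in ['+', '-', '*', '/', '%', '(']:
--                 return False
--
--         # Validate char if it is a number, operators or parenthesis.
--         if (strex[i] >= '0' and strex[i] <= '9') or strex[i] in ['+', '-', '*', '/', '%', '(', ')']: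
--             continue  # continue with the next character
--         else:
--             return False
--
--     return True  # We cannot find invalid chars.
-- ===== SOURCE B (Python) =====
-- # DFA over character classes: a table-driven finite automaton replaces A's indexed scan.
-- _TRANS = {
--     ('empty', 'd'): 'ok', ('empty', '('): 'bad',
--     ('ok', 'd'): 'ok', ('ok', ')'): 'ok', ('ok', '('): 'bad', ('ok', 'op'): 'bad',
--     ('bad', 'd'): 'ok', ('bad', ')'): 'ok', ('bad', '('): 'bad', ('bad', 'op'): 'bad',
-- }
--
--
-- def _cls(c):
--     if '0' <= c <= '9':
--         return 'd'
--     if c in '+-*/%':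
--         return 'op'
--     if c in '()':
--         return c
--     return 'other'
--
--
-- def valid_expression(strex):
--     """
--     Evaluate if strex is a valid mathematical expression.
--     Runs a 4-state DFA ('empty', 'ok', 'bad', 'dead') over character classes.
--     """
--     state = 'empty'
--     for c in strex:
--         state = _TRANS.get((state, _cls(c)), 'dead')
--         if state == 'dead':
--             break
--     return state in ('empty', 'ok')
-- ===== Notes on version B (the rewrite author's own statement) =====
-- stated objective: alternative
-- what changed: Replaces A's indexed scan with positional first/last tests by a table-driven four-state finite automaton run over character classes, accepting iff the final state is the initial or the good-ending state.
import Mathlib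
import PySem

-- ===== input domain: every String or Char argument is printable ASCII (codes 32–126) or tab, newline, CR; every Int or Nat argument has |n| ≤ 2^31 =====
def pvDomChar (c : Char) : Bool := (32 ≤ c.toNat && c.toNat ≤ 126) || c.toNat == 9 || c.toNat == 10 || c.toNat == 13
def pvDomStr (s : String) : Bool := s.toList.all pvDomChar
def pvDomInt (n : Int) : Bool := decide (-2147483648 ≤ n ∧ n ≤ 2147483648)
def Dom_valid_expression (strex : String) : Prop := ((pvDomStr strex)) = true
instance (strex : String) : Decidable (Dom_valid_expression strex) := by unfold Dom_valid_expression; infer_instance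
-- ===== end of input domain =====

-- B replaces A's indexed scan (positional first/last tests, early returns) by a table-driven
-- 4-state DFA over character classes: a genuinely different algorithm of the same cost.


-- ===== PORT A =====
-- transliteration of A's 'for i in range(len(strex))' loop with its three sequential checks;
-- the index is always in range (the dite guard is the range(len) bound itself)
def validA_loop (cs : List Char) (n : Nat) (i : Nat) : Bool :=
  if _h : i < n then
    if i = 0 ∧ cs.getD i ' ' ∈ ['+', '-', '*', '/', '%', ')'] then false
    else if i = n - 1 ∧ cs.getD i ' ' ∈ ['+', '-', '*', '/', '%', '('] then false
    else if ('0' ≤ cs.getD i ' ' ∧ cs.getD i ' ' ≤ '9') ∨ cs.getD i ' ' ∈ ['+', '-', '*', '/', '%', '(', ')'] then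
      validA_loop cs n (i + 1)
    else false
  else true
termination_by n - i

def valid_expression (strex : String) : Bool :=
  validA_loop strex.toList strex.toList.length 0

-- ===== PORT B =====
-- Source B's module-level transition table _TRANS, keyed by (state, character class)
def pvTransB : PySem.Dict (String × String) String := PySem.Dict.ofList
  [ (("empty", "d"), "ok"), (("empty", "("), "bad"),
    (("ok", "d"), "ok"), (("ok", ")"), "ok"), (("ok", "("), "bad"), (("ok", "op"), "bad"),
    (("bad", "d"), "ok"), (("bad", ")"), "ok"), (("bad", "("), "bad"), (("bad", "op"), "bad") ]

-- Source B's _cls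
def pvClsB (c : Char) : String :=
  if '0' ≤ c ∧ c ≤ '9' then "d"
  else if c ∈ ['+', '-', '*', '/', '%'] then "op"
  else if c ∈ ['(', ')'] then String.singleton c
  else "other"

-- Source B's for-loop with its early break on 'dead'
def validB_loop : List Char → String → String
  | [], st => st
  | c :: rest, st =>
      let st' := pvTransB.getD (st, pvClsB c) "dead"
      if st' = "dead" then st' else validB_loop rest st'

def valid_expression_alt (strex : String) : Bool :=
  let final := validB_loop strex.toList "empty"
  decide (final = "empty" ∨ final = "ok")

-- ===== PRECONDITION & SPEC =====
def Spec_valid_expression (strex : String) (out : Bool) : Prop := out = valid_expression_alt strex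
instance (strex : String) (out : Bool) : Decidable (Spec_valid_expression strex out) := by unfold Spec_valid_expression; infer_instance

-- ===== CLAIM (what is proved, stated in full; the proofs are below) =====
def Claim_equal_valid_expression : Prop := ∀ (strex : String), Dom_valid_expression strex → Spec_valid_expression strex (valid_expression strex)

-- ===== LEMMAS AND PROOFS =====

-- the character-class test as a Bool (used to characterise both loops)
def pvCls : Char → Bool := fun c =>
  decide (('0' ≤ c ∧ c ≤ '9') ∨ c ∈ ['+', '-', '*', '/', '%', '(', ')'])

-- 'good ending' characters: digits and ')'
def pvGd (c : Char) : Bool := decide (('0' ≤ c ∧ c ≤ '9') ∨ c = ')')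

-- the common characterisation both ports are proved equal to
def pvSpec : List Char → Bool
  | [] => true
  | c0 :: rest =>
      decide (('0' ≤ c0 ∧ c0 ≤ '9') ∨ c0 = '(') && rest.all pvCls && pvGd (rest.getLastD c0)

-- a class character is a non-bad closer exactly when it is a good ending
theorem gd_of_cls (l : Char) (h : pvCls l = true) :
    (!(decide (l ∈ ['+', '-', '*', '/', '%', '(']))) = pvGd l := by
  simp only [pvCls, decide_eq_true_eq] at h
  rcases h with h | h
  · have h1 : decide (l ∈ ['+', '-', '*', '/', '%', '(']) = false := by
      refine decide_eq_false ?_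
      intro hm; fin_cases hm <;> revert h <;> decide
    rw [h1]; simp [pvGd, h]
  · fin_cases h <;> decide

-- characterisation of A's loop from a positive index
theorem validA_loop_eq (cs : List Char) (i : Nat) (h1 : 1 ≤ i) (h2 : i < cs.length) :
    validA_loop cs cs.length i =
      ((cs.drop i).all pvCls
        && !(decide (cs.getD (cs.length - 1) ' ' ∈ ['+', '-', '*', '/', '%', '(']))) := by
  have hk : ∀ k i, 1 ≤ i → i < cs.length → cs.length - i = k →
      validA_loop cs cs.length i =
        ((cs.drop i).all pvCls
          && !(decide (cs.getD (cs.length - 1) ' ' ∈ ['+', '-', '*', '/', '%', '(']))) := by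
    intro k
    induction k with
    | zero => intro i _ h2 hk; omega
    | succ k ih =>
      intro i h1 h2 hk
      have hg : cs.getD i ' ' = cs[i] := by
        rw [List.getD_eq_getElem?_getD, List.getElem?_eq_getElem h2]; rfl
      have hdrop : cs.drop i = cs.getD i ' ' :: cs.drop (i + 1) := by
        rw [hg]; exact List.drop_eq_getElem_cons h2
      rw [validA_loop, dif_pos h2]
      by_cases hlast : i = cs.length - 1
      · subst hlast
        rw [if_neg (fun h => absurd h.1 (by omega))]
        have hdrop1 : cs.drop (cs.length - 1 + 1) = [] := List.drop_eq_nil_of_le (by omega)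
        by_cases hb : cs.getD (cs.length - 1) ' ' ∈ ['+', '-', '*', '/', '%', '(']
        · rw [if_pos ⟨rfl, hb⟩, decide_eq_true hb, Bool.not_true, Bool.and_false]
        · rw [if_neg (fun h => hb h.2), decide_eq_false hb, Bool.not_false, Bool.and_true]
          rw [hdrop, hdrop1, List.all_cons, List.all_nil, Bool.and_true]
          by_cases hc : ('0' ≤ cs.getD (cs.length - 1) ' ' ∧ cs.getD (cs.length - 1) ' ' ≤ '9')
              ∨ cs.getD (cs.length - 1) ' ' ∈ ['+', '-', '*', '/', '%', '(', ')']
          · rw [if_pos hc, validA_loop, dif_neg (by omega)]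
            simp only [pvCls, decide_eq_true hc]
          · rw [if_neg hc]
            simp only [pvCls, decide_eq_false hc]
      · have hIH := ih (i + 1) (by omega) (by omega) (by omega)
        rw [if_neg (fun h => absurd h.1 (by omega)), if_neg (fun h => hlast h.1)]
        rw [hdrop, List.all_cons]
        by_cases hc : ('0' ≤ cs.getD i ' ' ∧ cs.getD i ' ' ≤ '9')
            ∨ cs.getD i ' ' ∈ ['+', '-', '*', '/', '%', '(', ')']
        · rw [if_pos hc, hIH]
          simp only [pvCls, decide_eq_true hc, Bool.true_and]
        · rw [if_neg hc]
          simp only [pvCls, decide_eq_false hc, Bool.false_and]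
  exact hk (cs.length - i) i h1 h2 rfl

-- getLastD with any default is getLast on a nonempty list
theorem getLastD_ne_nil (l : List Char) (h : l ≠ []) (d : Char) : l.getLastD d = l.getLast h := by
  rw [List.getLastD_eq_getLast?, List.getLast?_eq_some_getLast h]; rfl

-- A's loop from index 0 computes pvSpec
theorem validA_eq_spec (cs : List Char) : validA_loop cs cs.length 0 = pvSpec cs := by
  match cs with
  | [] => rw [validA_loop, dif_neg (by simp)]; rfl
  | c0 :: rest =>
    rw [validA_loop, dif_pos (by simp)]
    have hg0 : (c0 :: rest).getD 0 ' ' = c0 := rfl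
    rw [hg0, pvSpec]
    by_cases hfb : c0 ∈ ['+', '-', '*', '/', '%', ')']
    · rw [if_pos ⟨rfl, hfb⟩]
      have h1 : decide (('0' ≤ c0 ∧ c0 ≤ '9') ∨ c0 = '(') = false := by
        fin_cases hfb <;> decide
      simp [h1]
    · rw [if_neg (fun h => hfb h.2)]
      rcases eq_or_ne rest [] with hr | hr
      · subst hr
        by_cases hlb : c0 ∈ ['+', '-', '*', '/', '%', '(']
        · rw [if_pos ⟨rfl, hlb⟩]
          fin_cases hlb <;> decide
        · rw [if_neg (fun h => hlb h.2)]
          by_cases hc : ('0' ≤ c0 ∧ c0 ≤ '9') ∨ c0 ∈ ['+', '-', '*', '/', '%', '(', ')']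
          · rw [if_pos hc, validA_loop, dif_neg (by simp)]
            rcases hc with hd | hmem
            · simp [pvGd, hd]
            · exfalso
              fin_cases hmem <;> first
                | exact hfb (by decide)
                | exact hlb (by decide)
          · rw [if_neg hc]
            have h1 : decide (('0' ≤ c0 ∧ c0 ≤ '9') ∨ c0 = '(') = false := by
              refine decide_eq_false ?_
              rintro (hd | hp)
              · exact hc (Or.inl hd)
              · exact hc (Or.inr (by subst hp; decide))
            simp [h1]
      · have hlen : 1 ≤ rest.length := List.length_pos_of_ne_nil hr
        rw [if_neg (fun h => absurd h.1 (by simp only [List.length_cons]; omega))]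
        by_cases hc : ('0' ≤ c0 ∧ c0 ≤ '9') ∨ c0 ∈ ['+', '-', '*', '/', '%', '(', ')']
        · rw [if_pos hc]
          rw [validA_loop_eq (c0 :: rest) 1 le_rfl (by simp only [List.length_cons]; omega)]
          have hdrop : (c0 :: rest).drop 1 = rest := rfl
          have hidx : rest.length < (c0 :: rest).length := by simp
          have hlastD : (c0 :: rest).getD ((c0 :: rest).length - 1) ' ' = rest.getLast hr := by
            have h1 : (c0 :: rest).length - 1 = rest.length := by simp
            rw [h1, List.getD_eq_getElem?_getD, List.getElem?_eq_getElem hidx,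
              Option.getD_some]
            rw [show (c0 :: rest)[rest.length] = (c0 :: rest).getLast (by simp) from
              ((List.getLast_eq_getElem (l := c0 :: rest) (by simp)).trans (by simp)).symm]
            exact List.getLast_cons hr
          have hfirst : decide (('0' ≤ c0 ∧ c0 ≤ '9') ∨ c0 = '(') = true := by
            rcases hc with hd | hmem
            · simp [hd]
            · fin_cases hmem <;> first
                | exact absurd (by decide) hfb
                | decide
          rw [hdrop, hlastD, hfirst, Bool.true_and, getLastD_ne_nil rest hr c0]
          by_cases hall : rest.all pvCls = true
          · have hclsl : pvCls (rest.getLast hr) = true :=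
              List.all_eq_true.mp hall _ (List.getLast_mem hr)
            rw [hall, gd_of_cls _ hclsl, Bool.true_and]
          · rw [Bool.eq_false_iff.mpr hall]
            simp
        · rw [if_neg hc]
          have h1 : decide (('0' ≤ c0 ∧ c0 ≤ '9') ∨ c0 = '(') = false := by
            refine decide_eq_false ?_
            rintro (hd | hp)
            · exact hc (Or.inl hd)
            · exact hc (Or.inr (by subst hp; decide))
          simp [h1]

-- characterisation of B's loop from a live non-initial state
theorem validB_loop_eq (cs : List Char) : ∀ st, st = "ok" ∨ st = "bad" →
    validB_loop cs st =
      (if cs.all pvCls = true then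
        (if cs = [] then st else if pvGd (cs.getLastD '0') then "ok" else "bad")
       else "dead") := by
  induction cs with
  | nil => intro st _; simp [validB_loop]
  | cons c rest ih =>
    intro st hst
    rw [validB_loop]
    have hlastD : rest ≠ [] → (c :: rest).getLastD '0' = rest.getLastD '0' := by
      intro hr
      rw [getLastD_ne_nil rest hr '0', getLastD_ne_nil (c :: rest) (by simp) '0']
      exact List.getLast_cons hr
    by_cases hd : '0' ≤ c ∧ c ≤ '9'
    · have hcls : pvClsB c = "d" := by rw [pvClsB, if_pos hd]
      have hstep : pvTransB.getD (st, pvClsB c) "dead" = "ok" := by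
        rcases hst with h | h <;> rw [h, hcls] <;> decide
      rw [hstep, if_neg (by decide), ih "ok" (Or.inl rfl)]
      have hc : pvCls c = true := by simp [pvCls, hd]
      have hg : pvGd c = true := by simp [pvGd, hd]
      rcases eq_or_ne rest [] with hr | hr
      · subst hr; simp [hc, hg]
      · rw [List.all_cons, hc, Bool.true_and, hlastD hr,
          if_neg (List.cons_ne_nil c rest)]
        by_cases hall : rest.all pvCls = true
        · rw [hall, if_pos rfl, if_pos rfl, if_neg hr]
        · rw [Bool.eq_false_iff.mpr hall]; simp
    · by_cases hop : c ∈ ['+', '-', '*', '/', '%']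
      · have hcls : pvClsB c = "op" := by rw [pvClsB, if_neg hd, if_pos hop]
        have hstep : pvTransB.getD (st, pvClsB c) "dead" = "bad" := by
          rcases hst with h | h <;> rw [h, hcls] <;> decide
        rw [hstep, if_neg (by decide), ih "bad" (Or.inr rfl)]
        have hc : pvCls c = true := by
          simp only [pvCls, decide_eq_true_eq]
          exact Or.inr (by fin_cases hop <;> simp)
        have hg : pvGd c = false := by
          simp only [pvGd, decide_eq_false_iff_not]
          rintro (h | h)
          · exact hd h
          · subst h; exact absurd hop (by decide)
        rcases eq_or_ne rest [] with hr | hr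
        · subst hr; simp [hc, hg]
        · rw [List.all_cons, hc, Bool.true_and, hlastD hr,
            if_neg (List.cons_ne_nil c rest)]
          by_cases hall : rest.all pvCls = true
          · rw [hall, if_pos rfl, if_pos rfl, if_neg hr]
          · rw [Bool.eq_false_iff.mpr hall]; simp
      · by_cases hpar : c ∈ ['(', ')']
        · have hcls : pvClsB c = String.singleton c := by
            rw [pvClsB, if_neg hd, if_neg hop, if_pos hpar]
          have hc : pvCls c = true := by
            simp only [pvCls, decide_eq_true_eq]
            exact Or.inr (by fin_cases hpar <;> simp)
          have hstep : pvTransB.getD (st, pvClsB c) "dead"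
              = (if c = ')' then "ok" else "bad") := by
            rcases hst with h | h <;> subst h <;> fin_cases hpar <;> decide
          rw [hstep]
          by_cases hcp : c = ')'
          · subst hcp
            rw [if_pos rfl, if_neg (by decide), ih "ok" (Or.inl rfl)]
            have hg : pvGd ')' = true := by decide
            rcases eq_or_ne rest [] with hr | hr
            · subst hr; simp [hc, hg]
            · rw [List.all_cons, hc, Bool.true_and, hlastD hr,
                if_neg (List.cons_ne_nil ')' rest)]
              by_cases hall : rest.all pvCls = true
              · rw [hall, if_pos rfl, if_pos rfl, if_neg hr]
              · rw [Bool.eq_false_iff.mpr hall]; simp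
          · have hco : c = '(' := by
              fin_cases hpar
              · rfl
              · exact absurd rfl hcp
            subst hco
            rw [if_neg (by decide), if_neg (by decide), ih "bad" (Or.inr rfl)]
            have hg : pvGd '(' = false := by decide
            rcases eq_or_ne rest [] with hr | hr
            · subst hr; simp [hc, hg]
            · rw [List.all_cons, hc, Bool.true_and, hlastD hr,
                if_neg (List.cons_ne_nil '(' rest)]
              by_cases hall : rest.all pvCls = true
              · rw [hall, if_pos rfl, if_pos rfl, if_neg hr]
              · rw [Bool.eq_false_iff.mpr hall]; simp
        · have hcls : pvClsB c = "other" := by rw [pvClsB, if_neg hd, if_neg hop, if_neg hpar]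
          have hstep : pvTransB.getD (st, pvClsB c) "dead" = "dead" := by
            rcases hst with h | h <;> rw [h, hcls] <;> decide
          have hc : pvCls c = false := by
            simp only [pvCls, decide_eq_false_iff_not]
            rintro (h | h)
            · exact hd h
            · fin_cases h <;>
                first
                  | exact hop (by decide)
                  | exact hpar (by decide)
          rw [hstep, if_pos rfl]
          rw [List.all_cons, hc, Bool.false_and]
          simp

-- B computes pvSpec
theorem validB_eq_spec (cs : List Char) :
    (decide (validB_loop cs "empty" = "empty" ∨ validB_loop cs "empty" = "ok")) = pvSpec cs := by
  match cs with
  | [] => decide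
  | c0 :: rest =>
    rw [validB_loop, pvSpec]
    have hlastD : rest ≠ [] → rest.getLastD '0' = rest.getLastD c0 := by
      intro hr
      rw [getLastD_ne_nil rest hr '0', getLastD_ne_nil rest hr c0]
    by_cases hd : '0' ≤ c0 ∧ c0 ≤ '9'
    · have hcls : pvClsB c0 = "d" := by rw [pvClsB, if_pos hd]
      have hstep : pvTransB.getD (("empty" : String), pvClsB c0) "dead" = "ok" := by
        rw [hcls]; decide
      rw [hstep, if_neg (by decide), validB_loop_eq rest "ok" (Or.inl rfl)]
      have hfirst : decide (('0' ≤ c0 ∧ c0 ≤ '9') ∨ c0 = '(') = true := by simp [hd]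
      rw [hfirst, Bool.true_and]
      by_cases hall : rest.all pvCls = true
      · rw [hall, if_pos rfl, Bool.true_and]
        rcases eq_or_ne rest [] with hr | hr
        · subst hr
          have hg : pvGd c0 = true := by simp [pvGd, hd]
          simp [hg]
        · rw [if_neg hr, hlastD hr]
          by_cases hg : pvGd (rest.getLastD c0) = true
          · rw [hg, if_pos rfl]; decide
          · rw [Bool.eq_false_iff.mpr hg]; decide
      · rw [Bool.eq_false_iff.mpr hall]; simp
    · by_cases hpo : c0 = '('
      · subst hpo
        have hcls : pvClsB '(' = "(" := by decide
        have hstep : pvTransB.getD (("empty" : String), pvClsB '(') "dead" = "bad" := by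
          rw [hcls]; decide
        rw [hstep, if_neg (by decide), validB_loop_eq rest "bad" (Or.inr rfl)]
        have hfirst : decide ((('0':Char) ≤ '(' ∧ ('(':Char) ≤ '9') ∨ ('(':Char) = '(') = true := by decide
        rw [hfirst, Bool.true_and]
        by_cases hall : rest.all pvCls = true
        · rw [hall, if_pos rfl, Bool.true_and]
          rcases eq_or_ne rest [] with hr | hr
          · subst hr; decide
          · rw [if_neg hr, hlastD hr]
            by_cases hg : pvGd (rest.getLastD '(') = true
            · rw [hg, if_pos rfl]; decide
            · rw [Bool.eq_false_iff.mpr hg]; decide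
        · rw [Bool.eq_false_iff.mpr hall]; simp
      · have hstep : pvTransB.getD (("empty" : String), pvClsB c0) "dead" = "dead" := by
          rw [pvClsB, if_neg hd]
          by_cases hop : c0 ∈ ['+', '-', '*', '/', '%']
          · rw [if_pos hop]; decide
          · rw [if_neg hop]
            by_cases hpar : c0 ∈ ['(', ')']
            · rw [if_pos hpar]
              have : c0 = ')' := by
                fin_cases hpar
                · exact absurd rfl hpo
                · rfl
              subst this; decide
            · rw [if_neg hpar]; decide
        have hfirst : decide (('0' ≤ c0 ∧ c0 ≤ '9') ∨ c0 = '(') = false := by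
          refine decide_eq_false ?_
          rintro (h | h)
          · exact hd h
          · exact hpo h
        rw [hstep, if_pos rfl, hfirst, Bool.false_and, Bool.false_and]
        decide

-- ===== VERDICT (by name: the statement is the Claim_ definition above) =====
theorem valid_expression_spec : Claim_equal_valid_expression := by
  intro strex _
  unfold Spec_valid_expression valid_expression valid_expression_alt
  rw [validA_eq_spec]
  exact (validB_eq_spec strex.toList).symm
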